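-- pv_equiv track=rewrite | github.com/kimmandoo/Colorpl | app/crud/show.py | summarize_days
-- ===== SOURCE A (Python) =====
-- DAYS = ["월", "화", "수", "목", "금", "토", "일"]
--
-- def summarize_days(day_indices):
--     """Given a sorted list of day indices, summarize them into ranges like '월~금'."""
--     if not day_indices:
--         return ""
--
--     result = []
--     start = day_indices[0]
--     end = start
--
--     for i in range(1, len(day_indices)):
--         if day_indices[i] == end + 1:
--             end = day_indices[i]
--         else:
--             if start == end:
--                 result.append(DAYS[start])
--             else:
--                 result.append(f"{DAYS[start]}~{DAYS[end]}")
--             start = end = day_indices[i]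
--
--     if start == end:
--         result.append(DAYS[start])
--     else:
--         result.append(f"{DAYS[start]}~{DAYS[end]}")
--
--     return ", ".join(result)
-- ===== SOURCE B (Python) =====
-- DAYS = ["월", "화", "수", "목", "금", "토", "일"]
--
-- def _run_split(prev, rest):
--     """Recursively count how many leading elements of rest continue the run after prev."""
--     if rest and rest[0] == prev + 1:
--         return _run_split(rest[0], rest[1:]) + 1
--     return 0
--
-- def summarize_days(day_indices):
--     """Given a sorted list of day indices, summarize them into ranges like '월~금'."""
--     # Recursive decomposition: the first maximal run has length n+1 and ends at first + n;
--     # format it, recurse on the remaining slice, and concatenate the strings directly.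
--     if not day_indices:
--         return ""
--     first = day_indices[0]
--     n = _run_split(first, day_indices[1:])
--     head = DAYS[first] if n == 0 else f"{DAYS[first]}~{DAYS[first + n]}"
--     rest = summarize_days(day_indices[n + 1:])
--     return head if not rest else head + ", " + rest
-- ===== Notes on version B (the rewrite author's own statement) =====
-- stated objective: alternative
-- what changed: B is a recursive decomposition: it recursively counts the length of the first maximal consecutive run, derives the run's last day arithmetically as first+n, formats that run, recurses on the remaining slice and concatenates strings directly, instead of A's iterative index loop carrying start/end scalars into a result list joined at the end.
import Mathlib
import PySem

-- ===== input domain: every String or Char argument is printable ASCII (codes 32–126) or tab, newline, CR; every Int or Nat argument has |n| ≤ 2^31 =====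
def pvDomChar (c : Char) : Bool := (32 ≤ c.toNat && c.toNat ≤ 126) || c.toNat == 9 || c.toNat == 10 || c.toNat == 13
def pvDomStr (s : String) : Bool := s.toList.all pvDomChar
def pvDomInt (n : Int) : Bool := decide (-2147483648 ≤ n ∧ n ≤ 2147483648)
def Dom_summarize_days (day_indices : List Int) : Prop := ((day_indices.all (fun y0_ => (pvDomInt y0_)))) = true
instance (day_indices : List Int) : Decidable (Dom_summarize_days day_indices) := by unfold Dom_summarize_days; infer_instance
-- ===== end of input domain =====

-- B is a recursive decomposition (recursively count the first maximal run, format it using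
-- its arithmetic endpoint first+n, recurse on the remaining slice, concatenate directly)
-- instead of A's iterative index loop with start/end scalars, a result list and a join.

def pvDAYS : List String := ["월", "화", "수", "목", "금", "토", "일"]

-- ===== PORT A =====
-- `if start == end: result.append(DAYS[start]) else: result.append(f"{DAYS[start]}~{DAYS[end]}")`
def pvFmtA (s e : Int) : String :=
  if s = e then PySem.List.pyGetD pvDAYS s ""
  else PySem.List.pyGetD pvDAYS s "" ++ "~" ++ PySem.List.pyGetD pvDAYS e ""

-- one iteration of A's for-loop body on the state (result, start, end), given day_indices[i]
def pvStepA (st : List String × Int × Int) (x : Int) : List String × Int × Int :=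
  if x = st.2.2 + 1 then (st.1, st.2.1, x)
  else (st.1 ++ [pvFmtA st.2.1 st.2.2], x, x)

def summarize_days (day_indices : List Int) : String :=
  if day_indices = [] then ""
  else
    let start := PySem.List.pyGetD day_indices 0 0
    let st := (PySem.List.pyRange 1 (day_indices.length : Int) 1).foldl
        (fun acc i => pvStepA acc (PySem.List.pyGetD day_indices i 0)) ([], start, start)
    PySem.Str.join ", " (st.1 ++ [pvFmtA st.2.1 st.2.2])

-- ===== PORT B =====
-- `_run_split(prev, rest)`: structural recursion exactly as in Source B
def pvRunSplit (prev : Int) : List Int → Nat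
  | [] => 0
  | y :: t => if y = prev + 1 then pvRunSplit y t + 1 else 0

-- Source B's recursion consumes at least one element per call; the list's length is the
-- structural fuel making that recursion syntactically well-founded (same computation).
def pvAltFuel : Nat → List Int → String
  | _, [] => ""
  | 0, _ :: _ => ""
  | f + 1, x :: t =>
    let n := pvRunSplit x t
    let head := if n = 0 then PySem.List.pyGetD pvDAYS x ""
      else PySem.List.pyGetD pvDAYS x "" ++ "~" ++ PySem.List.pyGetD pvDAYS (x + (n : Int)) ""
    let rest := pvAltFuel f (PySem.List.slice (x :: t) (some ((n + 1 : Nat) : Int)) none)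
    if rest = "" then head else head ++ ", " ++ rest

def summarize_days_alt (day_indices : List Int) : String :=
  pvAltFuel day_indices.length day_indices

-- ===== PRECONDITION & SPEC =====
-- Pre_ excludes exactly the inputs where Python A raises IndexError: an element below -7 or
-- above 6 forces a run endpoint outside the 7-day table, so this condition is exact.
def Pre_summarize_days (day_indices : List Int) : Prop :=
  ∀ x ∈ day_indices, -7 ≤ x ∧ x < 7
instance (day_indices : List Int) : Decidable (Pre_summarize_days day_indices) := by
  unfold Pre_summarize_days; infer_instance

def pvWitness_summarize_days : List Int := [0, 1, 2, 4, 6]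

def Spec_summarize_days (day_indices : List Int) (out : String) : Prop := out = summarize_days_alt day_indices
instance (day_indices : List Int) (out : String) : Decidable (Spec_summarize_days day_indices out) := by unfold Spec_summarize_days; infer_instance

-- ===== CLAIM (what is proved, stated in full; the proofs are below) =====
def Claim_equal_summarize_days : Prop := ∀ (day_indices : List Int), Dom_summarize_days day_indices → Pre_summarize_days day_indices → Spec_summarize_days day_indices (summarize_days day_indices)

-- ===== LEMMAS AND PROOFS =====

-- the common reference point: the list of (first, last) pairs of the maximal consecutive runs
def pvStepB (runs : List (Int × Int)) (x : Int) : List (Int × Int) :=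
  match runs with
  | (a, b) :: rest => if a = x + 1 then (x, b) :: rest else (x, x) :: (a, b) :: rest
  | [] => [(x, x)]

def pvRuns (xs : List Int) : List (Int × Int) := xs.foldr (fun x rs => pvStepB rs x) []

def pvFmtB (p : Int × Int) : String :=
  if p.1 = p.2 then PySem.List.pyGetD pvDAYS p.1 ""
  else PySem.List.pyGetD pvDAYS p.1 "" ++ "~" ++ PySem.List.pyGetD pvDAYS p.2 ""

-- ---- A-side: summarize_days xs = join ", " (map pvFmtB (pvRuns xs)) ----

def pvMerge (s e : Int) (rs : List (Int × Int)) : List (Int × Int) :=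
  match rs with
  | (a, b) :: r => if a = e + 1 then (s, b) :: r else (s, e) :: (a, b) :: r
  | [] => [(s, e)]

theorem pvMerge_stepB (s e y : Int) (rs : List (Int × Int)) :
    pvMerge s e (pvStepB rs y) =
      if y = e + 1 then pvMerge s y rs else (s, e) :: pvMerge y y rs := by
  cases rs with
  | nil => rfl
  | cons hd tl =>
    obtain ⟨a, b⟩ := hd
    simp only [pvStepB, pvMerge]
    split_ifs <;> simp_all

theorem pvMerge_self (x : Int) (rs : List (Int × Int)) : pvMerge x x rs = pvStepB rs x := by
  cases rs with
  | nil => rfl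
  | cons hd tl => obtain ⟨a, b⟩ := hd; simp [pvMerge, pvStepB]

-- loop invariant: flushing A's state after folding l equals the formatted merged runs of l
theorem pvInvA (l : List Int) : ∀ (res : List String) (s e : Int),
    (l.foldl pvStepA (res, s, e)).1 ++ [pvFmtA (l.foldl pvStepA (res, s, e)).2.1 (l.foldl pvStepA (res, s, e)).2.2]
      = res ++ (pvMerge s e (l.foldr (fun x rs => pvStepB rs x) [])).map pvFmtB := by
  induction l with
  | nil => intro res s e; simp [pvMerge, pvFmtB, pvFmtA]
  | cons y ys ih =>
    intro res s e
    simp only [List.foldl_cons, List.foldr_cons, pvMerge_stepB]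
    by_cases h : y = e + 1
    · rw [if_pos h]
      have : pvStepA (res, s, e) y = (res, s, y) := by simp [pvStepA, h]
      rw [this, ih]
    · rw [if_neg h]
      have : pvStepA (res, s, e) y = (res ++ [pvFmtA s e], y, y) := by simp [pvStepA, h]
      rw [this, ih]
      simp [pvFmtB, pvFmtA]

theorem pvA_runs (x : Int) (t : List Int) :
    summarize_days (x :: t) = PySem.Str.join ", " ((pvRuns (x :: t)).map pvFmtB) := by
  unfold summarize_days
  simp only [if_neg (List.cons_ne_nil x t)]
  have hrng : (PySem.List.pyRange 1 ((x :: t).length : Int) 1).foldl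
      (fun acc i => pvStepA acc (PySem.List.pyGetD (x :: t) i 0)) ([], x, x)
      = t.foldl pvStepA ([], x, x) := by
    have := PySem.List.foldl_pyRange_pyGetD' (x :: t) 0 pvStepA ([], x, x) (a := 1) (by omega)
    simpa using this
  rw [PySem.List.pyGetD_zero_cons, hrng]
  have hb : pvRuns (x :: t) = pvStepB (t.foldr (fun x rs => pvStepB rs x) []) x := by
    simp [pvRuns]
  rw [hb, ← pvMerge_self]
  have h := pvInvA t [] x x
  rw [List.nil_append] at h
  rw [h]

-- ---- B-side ----

-- the run list of a nonempty list starts with its first maximal run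
theorem pvRuns_cons (t : List Int) : ∀ (x : Int),
    pvRuns (x :: t) = (x, x + (pvRunSplit x t : Int)) :: pvRuns (t.drop (pvRunSplit x t)) := by
  induction t with
  | nil => intro x; simp [pvRuns, pvStepB, pvRunSplit]
  | cons y t' ih =>
    intro x
    have hstep : pvRuns (x :: y :: t') = pvStepB (pvRuns (y :: t')) x := by simp [pvRuns]
    by_cases h : y = x + 1
    · subst h
      rw [hstep, ih (x + 1)]
      simp only [pvStepB, pvRunSplit, if_true]
      rw [List.drop_succ_cons]
      congr 2
      push_cast; ring
    · rw [hstep, ih y]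
      simp only [pvStepB]
      rw [if_neg (by omega : ¬ y = x + 1)]
      simp only [pvRunSplit, if_neg h, List.drop_zero]
      rw [← ih y]
      norm_num

theorem pvStr_toList_inj (s t : String) (h : s.toList = t.toList) : s = t := by
  have := congrArg String.ofList h
  simpa using this

theorem pvAppend_ne_empty (p t : String) (h : p ≠ "") : p ++ t ≠ "" := by
  intro hc
  have := congrArg String.toList hc
  simp at this
  exact h this.1

theorem pvJoin_singleton (p : String) : PySem.Str.join ", " [p] = p := by
  simp [PySem.Str.join, PySem.Chars.join_singleton]

theorem pvJoin_cons_cons (p q : String) (r : List String) :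
    PySem.Str.join ", " (p :: q :: r) = p ++ ", " ++ PySem.Str.join ", " (q :: r) := by
  apply pvStr_toList_inj
  simp [PySem.Str.join, PySem.Chars.join_cons_cons]

theorem pvDay_ne_empty (a : Int) (h1 : -7 ≤ a) (h2 : a < 7) :
    PySem.List.pyGetD pvDAYS a "" ≠ "" := by
  interval_cases a <;> decide

theorem pvFmtB_ne_empty (p : Int × Int) (h1 : -7 ≤ p.1) (h2 : p.1 < 7) : pvFmtB p ≠ "" := by
  unfold pvFmtB
  split
  · exact pvDay_ne_empty p.1 h1 h2
  · exact pvAppend_ne_empty _ _ (pvAppend_ne_empty _ _ (pvDay_ne_empty p.1 h1 h2))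

theorem pvJoin_ne_empty (p : String) (r : List String) (h : p ≠ "") :
    PySem.Str.join ", " (p :: r) ≠ "" := by
  cases r with
  | nil => rw [pvJoin_singleton]; exact h
  | cons q r' => rw [pvJoin_cons_cons]; exact pvAppend_ne_empty _ _ (pvAppend_ne_empty _ _ h)

-- B equals the formatted run list, by induction on the fuel
theorem pvB_runs (f : Nat) : ∀ (xs : List Int), xs.length ≤ f → Pre_summarize_days xs →
    pvAltFuel f xs = PySem.Str.join ", " ((pvRuns xs).map pvFmtB) := by
  induction f with
  | zero =>
    intro xs hlen _
    have : xs = [] := List.eq_nil_of_length_eq_zero (by omega)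
    subst this
    simp [pvAltFuel, pvRuns, PySem.Str.join, PySem.Chars.join_nil]
  | succ m ih =>
    intro xs hlen hpre
    cases xs with
    | nil => simp [pvAltFuel, pvRuns, PySem.Str.join, PySem.Chars.join_nil]
    | cons x t =>
      unfold pvAltFuel
      set n := pvRunSplit x t with hn
      have hdrop1 : PySem.List.slice (x :: t) (some ((n + 1 : Nat) : Int)) none = t.drop n := by
        rw [PySem.List.slice_from_natCast, List.drop_succ_cons]
      have hhead : (if n = 0 then PySem.List.pyGetD pvDAYS x ""
          else PySem.List.pyGetD pvDAYS x "" ++ "~" ++ PySem.List.pyGetD pvDAYS (x + (n : Int)) "")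
          = pvFmtB (x, x + (n : Int)) := by
        by_cases hz : n = 0
        · rw [if_pos hz]
          unfold pvFmtB
          rw [if_pos (show x = x + (n : Int) by omega)]
        · rw [if_neg hz]
          unfold pvFmtB
          rw [if_neg (show ¬ x = x + (n : Int) by omega)]
      have hrest : pvAltFuel m (PySem.List.slice (x :: t) (some ((n + 1 : Nat) : Int)) none)
          = PySem.Str.join ", " ((pvRuns (t.drop n)).map pvFmtB) := by
        rw [hdrop1]
        apply ih
        · simp only [List.length_drop]
          simp at hlen; omega
        · intro z hz
          exact hpre z (List.mem_cons_of_mem x (List.mem_of_mem_drop hz))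
      simp only [hhead, hrest]
      rw [pvRuns_cons t x]
      simp only [← hn]
      cases hruns : pvRuns (t.drop n) with
      | nil =>
        simp only [List.map_cons, List.map_nil]
        rw [if_pos (by simp [PySem.Str.join, PySem.Chars.join_nil])]
        rw [pvJoin_singleton]
      | cons q qs =>
        have hq1 : -7 ≤ q.1 ∧ q.1 < 7 := by
          cases hdt : t.drop n with
          | nil => rw [hdt] at hruns; simp [pvRuns] at hruns
          | cons z u =>
            rw [hdt, pvRuns_cons u z] at hruns
            injection hruns with h1 _
            rw [← h1]
            have hz : z ∈ t.drop n := by rw [hdt]; exact List.mem_cons_self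
            exact hpre z (List.mem_cons_of_mem x (List.mem_of_mem_drop hz))
        have hne : PySem.Str.join ", " ((q :: qs).map pvFmtB) ≠ "" := by
          simp only [List.map_cons]
          exact pvJoin_ne_empty _ _ (pvFmtB_ne_empty q hq1.1 hq1.2)
        rw [if_neg hne]
        simp only [List.map_cons]
        rw [pvJoin_cons_cons]

-- ===== VERDICT (by name: the statement is the Claim_ definition above) =====
theorem summarize_days_spec : Claim_equal_summarize_days := by
  intro xs _ hpre
  unfold Spec_summarize_days summarize_days_alt
  cases xs with
  | nil => simp [summarize_days, pvAltFuel]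
  | cons x t =>
    rw [pvA_runs x t, pvB_runs (x :: t).length (x :: t) (le_refl _) hpre]
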